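-- pv_equiv track=rewrite | github.com/Sherinpour/nlp-hw | src/train/train_seq2seq.py | ids_to_tokens
-- ===== SOURCE A (Python) =====
-- from typing import List, Tuple, Dict
--
-- def ids_to_tokens(ids: List[int], inv_vocab: Dict[int,str], eos_tok: str) -> List[str]:
--     toks = []
--     for i in ids:
--         t = inv_vocab.get(int(i), "<unk>")
--         if t == eos_tok:
--             break
--         toks.append(t)
--     return toks
-- ===== SOURCE B (Python) =====
-- def ids_to_tokens(ids, inv_vocab, eos_tok):
--     tokens = [inv_vocab.get(int(i), "<unk>") for i in ids]
--     if eos_tok in tokens: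
--         return tokens[:tokens.index(eos_tok)]
--     return tokens
-- ===== Notes on version B (the rewrite author's own statement) =====
-- stated objective: alternative
-- what changed: Replaces the early-breaking accumulator loop with a build-the-full-token-list comprehension followed by locating the eos sentinel with index() and truncating via a slice.
import Mathlib
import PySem

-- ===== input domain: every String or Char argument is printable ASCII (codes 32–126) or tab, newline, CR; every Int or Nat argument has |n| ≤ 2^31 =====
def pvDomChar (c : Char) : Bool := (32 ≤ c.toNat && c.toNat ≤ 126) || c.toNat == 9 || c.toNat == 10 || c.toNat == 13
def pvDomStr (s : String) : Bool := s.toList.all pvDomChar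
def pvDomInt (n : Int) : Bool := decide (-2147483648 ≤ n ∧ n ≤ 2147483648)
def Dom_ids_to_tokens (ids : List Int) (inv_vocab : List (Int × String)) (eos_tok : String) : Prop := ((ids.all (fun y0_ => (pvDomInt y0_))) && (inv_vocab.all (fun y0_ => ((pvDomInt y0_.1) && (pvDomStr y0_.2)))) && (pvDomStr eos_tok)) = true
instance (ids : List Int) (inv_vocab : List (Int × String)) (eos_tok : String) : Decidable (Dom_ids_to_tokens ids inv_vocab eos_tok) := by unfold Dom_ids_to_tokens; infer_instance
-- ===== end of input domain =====

-- B builds the full token list, then locates the eos sentinel and truncates; A breaks out of an accumulator loop early (alternative decomposition, same cost).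

-- ===== PORT A =====
-- A's for-loop with break, as structural recursion over ids keeping A's order of steps.
def ids_to_tokens (ids : List Int) (inv_vocab : List (Int × String)) (eos_tok : String) : List String :=
  match ids with
  | [] => []
  | i :: rest =>
    let t := (PySem.Dict.mk inv_vocab).getD i "<unk>"
    if t = eos_tok then []                                  -- break
    else t :: ids_to_tokens rest inv_vocab eos_tok          -- toks.append(t)

-- ===== PORT B =====
def ids_to_tokens_alt (ids : List Int) (inv_vocab : List (Int × String)) (eos_tok : String) : List String :=
  let tokens := ids.map (fun i => (PySem.Dict.mk inv_vocab).getD i "<unk>")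
  if eos_tok ∈ tokens then
    match PySem.List.index? tokens eos_tok with
    | some n => tokens.take n                               -- tokens[:tokens.index(eos_tok)]
    | none => []                                            -- unreachable under the membership guard
  else tokens

-- ===== PRECONDITION & SPEC =====
def Spec_ids_to_tokens (ids : List Int) (inv_vocab : List (Int × String)) (eos_tok : String) (out : List String) : Prop := out = ids_to_tokens_alt ids inv_vocab eos_tok
instance (ids : List Int) (inv_vocab : List (Int × String)) (eos_tok : String) (out : List String) : Decidable (Spec_ids_to_tokens ids inv_vocab eos_tok out) := by unfold Spec_ids_to_tokens; infer_instance

-- ===== CLAIM (what is proved, stated in full; the proofs are below) =====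
def Claim_equal_ids_to_tokens : Prop := ∀ (ids : List Int) (inv_vocab : List (Int × String)) (eos_tok : String), Dom_ids_to_tokens ids inv_vocab eos_tok → Spec_ids_to_tokens ids inv_vocab eos_tok (ids_to_tokens ids inv_vocab eos_tok)

-- ===== LEMMAS AND PROOFS =====

-- B's cons-step: prepending a token either truncates immediately (if it is eos) or carries through.
theorem alt_cons (i : Int) (ids : List Int) (inv_vocab : List (Int × String)) (eos_tok : String) :
    ids_to_tokens_alt (i :: ids) inv_vocab eos_tok =
      (let t := (PySem.Dict.mk inv_vocab).getD i "<unk>"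
       if t = eos_tok then [] else t :: ids_to_tokens_alt ids inv_vocab eos_tok) := by
  simp only [ids_to_tokens_alt, List.map_cons]
  set t := (PySem.Dict.mk inv_vocab).getD i "<unk>" with ht
  set ts := ids.map (fun i => (PySem.Dict.mk inv_vocab).getD i "<unk>") with hts
  by_cases h : t = eos_tok
  · subst h
    simp only [PySem.List.index?_cons_self]
    simp
  · simp only [PySem.List.index?_cons_of_ne ts h]
    by_cases hm : eos_tok ∈ ts
    · rcases Option.isSome_iff_exists.mp ((PySem.List.index?_isSome_iff ts eos_tok).mpr hm) with ⟨n, hn⟩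
      rw [hn]
      simp [hm, h]
    · have hnone : PySem.List.index? ts eos_tok = none :=
        (PySem.List.index?_eq_none_iff ts eos_tok).mpr hm
      rw [hnone]
      simp [hm, h, Ne.symm h]

theorem ids_to_tokens_eq (ids : List Int) (inv_vocab : List (Int × String)) (eos_tok : String) :
    ids_to_tokens ids inv_vocab eos_tok = ids_to_tokens_alt ids inv_vocab eos_tok := by
  induction ids with
  | nil => simp [ids_to_tokens, ids_to_tokens_alt]
  | cons i rest ih =>
    rw [alt_cons]
    simp only [ids_to_tokens]
    split_ifs with h <;> simp [ih]

-- ===== VERDICT (by name: the statement is the Claim_ definition above) =====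
theorem ids_to_tokens_spec : Claim_equal_ids_to_tokens := by
  intro ids inv_vocab eos_tok _
  exact ids_to_tokens_eq ids inv_vocab eos_tok
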